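-- pv_equiv track=rewrite | github.com/JasonLiJT/code_jam | coderbyte/Q06-seating_students.py | SeatingStudents
-- ===== SOURCE A (Python) =====
-- def SeatingStudents(arr):
--   N = int(arr[0])
--   occupied = set(arr[1:])
--
--   def count_desk(i):
--     if i in occupied:
--       return 0
--
--     count = 0
--
--     if i & 1:  # odd
--       neighbours = [i-2, i+1, i+2]
--     else:  # even
--       neighbours = [i-2, i-1, i+2]
--
--     for j in neighbours:
--       if 1 <= j <= N:
--         if j not in occupied:
--           count += 1
--
--     return count
--
--   ans = 0
--   for i in range(1, N+1):
--     ans += count_desk(i)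
--
--   ans = ans // 2  # Counted each pair twice
--
--   return ans
-- ===== SOURCE B (Python) =====
-- def SeatingStudents(arr):
--     N = int(arr[0])
--     occupied = set(arr[1:])
--
--     def free(i):
--         return 1 <= i <= N and i not in occupied
--
--     total = 0
--     for i in range(1, N + 1):
--         if free(i):
--             if free(i + 2):
--                 total += 1
--             if (i & 1) and free(i + 1):
--                 total += 1
--     return total
-- ===== Notes on version B (the rewrite author's own statement) =====
-- stated objective: simpler
-- what changed: B enumerates each free-pair edge exactly once in a single forward scan (count i+2, and i+1 only from odd i) and returns the total directly, instead of A's per-desk sum of directed incidences over parity-dependent neighbour lists followed by an integer halving.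
import Mathlib
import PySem

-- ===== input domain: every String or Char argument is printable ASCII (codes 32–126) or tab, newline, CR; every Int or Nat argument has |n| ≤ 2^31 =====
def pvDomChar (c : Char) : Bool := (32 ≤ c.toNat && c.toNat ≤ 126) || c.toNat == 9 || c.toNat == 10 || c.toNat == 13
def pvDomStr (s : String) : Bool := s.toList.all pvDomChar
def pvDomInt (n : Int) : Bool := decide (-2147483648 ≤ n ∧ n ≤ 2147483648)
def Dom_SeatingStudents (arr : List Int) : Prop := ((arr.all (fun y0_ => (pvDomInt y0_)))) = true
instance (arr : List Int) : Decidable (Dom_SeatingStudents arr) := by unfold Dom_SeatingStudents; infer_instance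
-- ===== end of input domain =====

-- B counts each adjacent free-pair edge exactly once in a forward scan instead of
-- A's halved sum of per-desk directed incidences (objective: simpler).

-- ===== PORT A =====
-- count_desk(i): parity-dependent neighbour list, count in-range free neighbours
def pyCountDesk (N : Int) (occ : List Int) (i : Int) : Int :=
  if occ.contains i then 0
  else
    (if PySem.Int.band i 1 ≠ 0 then [i - 2, i + 1, i + 2] else [i - 2, i - 1, i + 2]).foldl
      (fun c j => if 1 ≤ j ∧ j ≤ N then (if occ.contains j then c else c + 1) else c) 0

def SeatingStudents (arr : List Int) : Int :=
  let N : Int := (PySem.List.pyGet? arr 0).getD 0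
  let occupied : List Int := PySem.Set.ofList (PySem.List.slice arr (some 1) none)
  let ans : Int :=
    (PySem.List.pyRange 1 (N + 1) 1).foldl (fun a i => a + pyCountDesk N occupied i) 0
  PySem.Int.floordiv ans 2

-- ===== PORT B =====
def altFree (N : Int) (occ : List Int) (i : Int) : Bool :=
  1 ≤ i && i ≤ N && !(occ.contains i)

def SeatingStudents_alt (arr : List Int) : Int :=
  let N : Int := (PySem.List.pyGet? arr 0).getD 0
  let occ : List Int := PySem.Set.ofList (PySem.List.slice arr (some 1) none)
  (PySem.List.pyRange 1 (N + 1) 1).foldl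
    (fun t i =>
      if altFree N occ i then
        let t1 := if altFree N occ (i + 2) then t + 1 else t
        if PySem.Int.band i 1 ≠ 0 ∧ altFree N occ (i + 1) then t1 + 1 else t1
      else t) 0

-- ===== PRECONDITION & SPEC =====
-- Pre_ excludes only the empty list, on which A raises IndexError reading the first element.
def Pre_SeatingStudents (arr : List Int) : Prop := arr ≠ []
instance (arr : List Int) : Decidable (Pre_SeatingStudents arr) := by
  unfold Pre_SeatingStudents; infer_instance

def pvWitness_SeatingStudents : List Int := [5, 2, 4]

def Spec_SeatingStudents (arr : List Int) (out : Int) : Prop := out = SeatingStudents_alt arr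
instance (arr : List Int) (out : Int) : Decidable (Spec_SeatingStudents arr out) := by unfold Spec_SeatingStudents; infer_instance

-- ===== CLAIM (what is proved, stated in full; the proofs are below) =====
def Claim_equal_SeatingStudents : Prop := ∀ (arr : List Int), Dom_SeatingStudents arr → Pre_SeatingStudents arr → Spec_SeatingStudents arr (SeatingStudents arr)

-- ===== LEMMAS AND PROOFS =====

-- 0/1 indicator of a free in-range desk
def pvInd (N : Int) (occ : List Int) (j : Int) : Int :=
  if altFree N occ j then 1 else 0

lemma pvInd_zero_lo (N : Int) (occ : List Int) (j : Int) (h : j ≤ 0) :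
    pvInd N occ j = 0 := by
  simp only [pvInd, altFree]
  split_ifs with hf
  · simp at hf; omega
  · rfl

lemma pvInd_zero_hi (N : Int) (occ : List Int) (j : Int) (h : N < j) :
    pvInd N occ j = 0 := by
  simp only [pvInd, altFree]
  split_ifs with hf
  · simp at hf; omega
  · rfl

-- one inner-loop step of A adds the indicator of desk j
lemma pvStep (N : Int) (occ : List Int) (c j : Int) :
    (if 1 ≤ j ∧ j ≤ N then (if occ.contains j then c else c + 1) else c) =
      c + pvInd N occ j := by
  simp only [pvInd, altFree, List.contains_eq_mem, Bool.and_eq_true, decide_eq_true_eq,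
    Bool.not_eq_true', decide_eq_false_iff_not]
  split_ifs <;> simp_all <;> omega

lemma pvInd_of_mem (N : Int) (occ : List Int) (i : Int) (h : occ.contains i = true) :
    pvInd N occ i = 0 := by
  have hmem : i ∈ occ := by simpa using h
  simp only [pvInd, altFree]
  rw [if_neg (by simp [hmem])]

-- A's per-desk count expressed through the indicator
lemma countDesk_eq (N : Int) (occ : List Int) (i : Int) (h1 : 1 ≤ i) (h2 : i ≤ N) :
    pyCountDesk N occ i =
      pvInd N occ i *
        (pvInd N occ (i - 2) +
          (if PySem.Int.band i 1 ≠ 0 then pvInd N occ (i + 1) else pvInd N occ (i - 1)) +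
          pvInd N occ (i + 2)) := by
  by_cases hc : occ.contains i = true
  · rw [pvInd_of_mem N occ i hc, zero_mul]
    unfold pyCountDesk
    rw [if_pos hc]
  · have hm : i ∉ occ := by simpa using hc
    have hfree : pvInd N occ i = 1 := by simp [pvInd, altFree, h1, h2, hm]
    unfold pyCountDesk
    rw [if_neg hc, hfree, one_mul]
    by_cases hp : PySem.Int.band i 1 = 0
    · rw [if_neg (not_not_intro hp), if_neg (not_not_intro hp)]
      simp only [List.foldl_cons, List.foldl_nil, pvStep]
      ring
    · rw [if_pos hp, if_pos hp]
      simp only [List.foldl_cons, List.foldl_nil, pvStep]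
      ring

-- B's loop body adds exactly the forward edge count of i
lemma altBody_eq (N : Int) (occ : List Int) (t i : Int) :
    (if altFree N occ i then
        let t1 := if altFree N occ (i + 2) then t + 1 else t
        if PySem.Int.band i 1 ≠ 0 ∧ altFree N occ (i + 1) then t1 + 1 else t1
      else t) =
      t + (pvInd N occ i * pvInd N occ (i + 2) +
        (if PySem.Int.band i 1 ≠ 0 then pvInd N occ i * pvInd N occ (i + 1) else 0)) := by
  simp only [pvInd]
  split_ifs <;> simp_all <;> omega

-- parity of band i 1 as emod
lemma band_one_ne_zero (i : Int) : (PySem.Int.band i 1 ≠ 0) ↔ i % 2 ≠ 0 := by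
  rw [PySem.Int.band_one, PySem.Int.mod_eq_emod_of_pos]; omega

-- finite sums over List.range, with peeling rules
def pvSum (n : Nat) (f : Nat → Int) : Int := ((List.range n).map f).sum

lemma pvSum_top (n : Nat) (f : Nat → Int) : pvSum (n + 1) f = pvSum n f + f n := by
  simp [pvSum, List.range_succ]

lemma pvSum_top2 (n : Nat) (f : Nat → Int) :
    pvSum (n + 2) f = pvSum n f + f n + f (n + 1) := by
  have h : n + 2 = (n + 1) + 1 := rfl
  rw [h, pvSum_top, pvSum_top]

lemma pvSum_bot (n : Nat) (f : Nat → Int) :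
    pvSum (n + 1) f = f 0 + pvSum n (fun k => f (k + 1)) := by
  simp [pvSum, List.range_succ_eq_map, List.map_map, Function.comp_def]

lemma pvSum_bot2 (n : Nat) (f : Nat → Int) :
    pvSum (n + 2) f = f 0 + f 1 + pvSum n (fun k => f (k + 1 + 1)) := by
  have h : n + 2 = (n + 1) + 1 := rfl
  rw [h, pvSum_bot, pvSum_bot]
  ring

lemma pvSum_congr (n : Nat) (f g : Nat → Int) (h : ∀ k, k < n → f k = g k) :
    pvSum n f = pvSum n g := by
  induction n with
  | zero => rfl
  | succ m ih =>
    rw [pvSum_top, pvSum_top, ih (fun k hk => h k (by omega)), h m (by omega)]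

lemma pvSum_add (n : Nat) (f g : Nat → Int) :
    pvSum n (fun k => f k + g k) = pvSum n f + pvSum n g := by
  induction n with
  | zero => rfl
  | succ m ih => rw [pvSum_top, pvSum_top, pvSum_top, ih]; ring

-- reindexing: backward distance-2 incidences are the forward ones
lemma pvShiftTwo (n : Nat) (F : Int → Int) (h0 : ∀ j : Int, j ≤ 0 → F j = 0)
    (ht : ∀ j : Int, (n : Int) < j → F j = 0) :
    pvSum n (fun k => F ((k : Int) + 1) * F ((k : Int) - 1)) =
      pvSum n (fun k => F ((k : Int) + 1) * F ((k : Int) + 3)) := by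
  match n with
  | 0 => rfl
  | 1 =>
    have l1 : pvSum 1 (fun k => F ((k : Int) + 1) * F ((k : Int) - 1)) =
        F (((0 : Nat) : Int) + 1) * F (((0 : Nat) : Int) - 1) := by
      simp [pvSum]
    have r1 : pvSum 1 (fun k => F ((k : Int) + 1) * F ((k : Int) + 3)) =
        F (((0 : Nat) : Int) + 1) * F (((0 : Nat) : Int) + 3) := by
      simp [pvSum]
    rw [l1, r1, h0 (((0 : Nat) : Int) - 1) (by omega),
      ht (((0 : Nat) : Int) + 3) (by omega)]
  | (m + 2) =>
    conv_lhs => rw [pvSum_bot2]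
    conv_rhs => rw [pvSum_top2]
    beta_reduce
    rw [h0 ((((0 : Nat)) : Int) - 1) (by omega),
      h0 ((((1 : Nat)) : Int) - 1) (by omega),
      ht (((m : Nat) : Int) + 3) (by omega),
      ht ((((m + 1 : Nat)) : Int) + 3) (by omega)]
    have hc : pvSum m (fun k => F (((k + 1 + 1 : Nat) : Int) + 1) * F (((k + 1 + 1 : Nat) : Int) - 1)) =
        pvSum m (fun k => F ((k : Int) + 1) * F ((k : Int) + 3)) := by
      apply pvSum_congr
      intro k _
      have e1 : ((k + 1 + 1 : Nat) : Int) + 1 = (k : Int) + 3 := by push_cast; ring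
      have e2 : ((k + 1 + 1 : Nat) : Int) - 1 = (k : Int) + 1 := by push_cast; ring
      rw [e1, e2]; ring
    rw [hc]; ring

-- reindexing: even-desk backward incidences are the odd-desk forward ones
lemma pvShiftPar (n : Nat) (F : Int → Int) (h0 : ∀ j : Int, j ≤ 0 → F j = 0)
    (ht : ∀ j : Int, (n : Int) < j → F j = 0) :
    pvSum n (fun k => if ((k : Int) + 1) % 2 = 0 then F ((k : Int) + 1) * F (k : Int) else 0) =
      pvSum n (fun k => if ((k : Int) + 1) % 2 = 0 then 0 else F ((k : Int) + 1) * F ((k : Int) + 2)) := by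
  match n with
  | 0 => rfl
  | (m + 1) =>
    conv_lhs => rw [pvSum_bot]
    conv_rhs => rw [pvSum_top]
    beta_reduce
    have e0 : (if ((((0 : Nat)) : Int) + 1) % 2 = 0 then
        F (((0 : Nat) : Int) + 1) * F ((0 : Nat) : Int) else 0) = 0 := by
      norm_num
    have em : (if (((m : Nat) : Int) + 1) % 2 = 0 then 0
        else F (((m : Nat) : Int) + 1) * F (((m : Nat) : Int) + 2)) = 0 := by
      rw [ht (((m : Nat) : Int) + 2) (by omega)]
      split_ifs <;> ring
    rw [e0, em]
    have hc : pvSum m (fun k => if ((((k + 1 : Nat)) : Int) + 1) % 2 = 0 then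
          F (((k + 1 : Nat) : Int) + 1) * F ((k + 1 : Nat) : Int) else 0) =
        pvSum m (fun k => if ((k : Int) + 1) % 2 = 0 then 0
          else F ((k : Int) + 1) * F ((k : Int) + 2)) := by
      apply pvSum_congr
      intro k _
      have e1 : ((k + 1 : Nat) : Int) + 1 = (k : Int) + 2 := by push_cast; ring
      have e2 : ((k + 1 : Nat) : Int) = (k : Int) + 1 := by push_cast; ring
      rw [e1, e2]
      by_cases hk : ((k : Int) + 1) % 2 = 0
      · rw [if_neg (by omega), if_pos hk]
      · rw [if_pos (by omega), if_neg hk]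
        ring
    rw [hc]; ring

-- the double-counting identity: A's incidence sum is twice B's edge sum
lemma pvCore (n : Nat) (F : Int → Int) (h0 : ∀ j : Int, j ≤ 0 → F j = 0)
    (ht : ∀ j : Int, (n : Int) < j → F j = 0) :
    pvSum n (fun k => F ((k : Int) + 1) *
        (F ((k : Int) + 1 - 2) +
          (if PySem.Int.band ((k : Int) + 1) 1 ≠ 0 then F ((k : Int) + 1 + 1) else F ((k : Int) + 1 - 1)) +
          F ((k : Int) + 1 + 2))) =
      2 * pvSum n (fun k => F ((k : Int) + 1) * F ((k : Int) + 1 + 2) +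
        (if PySem.Int.band ((k : Int) + 1) 1 ≠ 0 then F ((k : Int) + 1) * F ((k : Int) + 1 + 1) else 0)) := by
  have hsplit : ∀ k : Nat, k < n → (F ((k : Int) + 1) *
        (F ((k : Int) + 1 - 2) +
          (if PySem.Int.band ((k : Int) + 1) 1 ≠ 0 then F ((k : Int) + 1 + 1) else F ((k : Int) + 1 - 1)) +
          F ((k : Int) + 1 + 2))) =
      (F ((k : Int) + 1) * F ((k : Int) - 1)) +
      ((((if ((k : Int) + 1) % 2 = 0 then F ((k : Int) + 1) * F (k : Int) else 0) +
        (if ((k : Int) + 1) % 2 = 0 then 0 else F ((k : Int) + 1) * F ((k : Int) + 2)))) +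
       (F ((k : Int) + 1) * F ((k : Int) + 3))) := by
    intro k _
    have hb := band_one_ne_zero ((k : Int) + 1)
    have e1 : (k : Int) + 1 - 2 = (k : Int) - 1 := by ring
    have e2 : (k : Int) + 1 - 1 = (k : Int) := by ring
    have e3 : (k : Int) + 1 + 2 = (k : Int) + 3 := by ring
    have e4 : (k : Int) + 1 + 1 = (k : Int) + 2 := by ring
    by_cases hk : ((k : Int) + 1) % 2 = 0
    · simp only [hb, e1, e2, e3, e4, if_pos hk, if_neg (show ¬((k : Int) + 1) % 2 ≠ 0 from not_not_intro hk)]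
      ring
    · simp only [hb, e1, e2, e3, e4, if_neg hk, if_pos hk]
      ring
  have hbsplit : ∀ k : Nat, k < n → (F ((k : Int) + 1) * F ((k : Int) + 1 + 2) +
        (if PySem.Int.band ((k : Int) + 1) 1 ≠ 0 then F ((k : Int) + 1) * F ((k : Int) + 1 + 1) else 0)) =
      (F ((k : Int) + 1) * F ((k : Int) + 3)) +
        (if ((k : Int) + 1) % 2 = 0 then 0 else F ((k : Int) + 1) * F ((k : Int) + 2)) := by
    intro k _
    have hb := band_one_ne_zero ((k : Int) + 1)
    have e3 : (k : Int) + 1 + 2 = (k : Int) + 3 := by ring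
    have e4 : (k : Int) + 1 + 1 = (k : Int) + 2 := by ring
    rw [e3, e4]
    by_cases hk : ((k : Int) + 1) % 2 = 0
    · simp only [hb, if_pos hk, if_neg (show ¬((k : Int) + 1) % 2 ≠ 0 from not_not_intro hk)]
    · simp only [hb, if_neg hk, if_pos hk]
  rw [pvSum_congr _ _ _ hsplit, pvSum_congr _ _ _ hbsplit]
  rw [pvSum_add, pvSum_add, pvSum_add, pvSum_add]
  rw [pvShiftTwo n F h0 ht, pvShiftPar n F h0 ht]
  ring

-- a loop that adds g(i) over range(1, N+1) is a pvSum
lemma pvFoldlRange (N : Int) (g : Int → Int) :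
    (PySem.List.pyRange 1 (N + 1) 1).foldl (fun a i => a + g i) 0 =
      pvSum N.toNat (fun k => g ((k : Int) + 1)) := by
  rw [PySem.List.foldl_add, PySem.List.pyRange_one, zero_add, List.map_map]
  have h1 : (N + 1 - 1) = N := by ring
  rw [h1]
  show ((List.range N.toNat).map _).sum = ((List.range N.toNat).map _).sum
  apply congrArg
  apply List.map_congr_left
  intro a _
  show g (1 + (a : Int)) = g ((a : Int) + 1)
  rw [add_comm]

-- both loops compared
lemma pvMain (N : Int) (occ : List Int) :
    PySem.Int.floordiv
        ((PySem.List.pyRange 1 (N + 1) 1).foldl (fun a i => a + pyCountDesk N occ i) 0) 2 =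
      (PySem.List.pyRange 1 (N + 1) 1).foldl
        (fun t i =>
          if altFree N occ i then
            let t1 := if altFree N occ (i + 2) then t + 1 else t
            if PySem.Int.band i 1 ≠ 0 ∧ altFree N occ (i + 1) then t1 + 1 else t1
          else t) 0 := by
  by_cases hN : N < 0
  · rw [PySem.List.pyRange_one_eq_nil (by omega)]
    simp [PySem.Int.floordiv_eq_ediv_of_pos (show (0 : Int) < 2 by omega)]
  · simp only [altBody_eq]
    rw [pvFoldlRange N _, pvFoldlRange N _]
    rw [pvSum_congr N.toNat _ _
      (fun k hk => countDesk_eq N occ ((k : Int) + 1) (by omega) (by omega))]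
    rw [pvCore N.toNat (pvInd N occ) (fun j hj => pvInd_zero_lo N occ j hj)
      (fun j hj => pvInd_zero_hi N occ j (by omega))]
    rw [PySem.Int.floordiv_eq_ediv_of_pos (show (0 : Int) < 2 by omega)]
    exact Int.mul_ediv_cancel_left _ (by omega)

-- ===== VERDICT (by name: the statement is the Claim_ definition above) =====
theorem SeatingStudents_spec : Claim_equal_SeatingStudents := by
  intro arr _ _
  unfold Spec_SeatingStudents SeatingStudents SeatingStudents_alt
  exact pvMain _ _
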